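-- pv_equiv track=rewrite | github.com/BapDiedler/Cours_Fac | 4/LangageFormel/prog/pythonProg.py | T_aux
-- ===== SOURCE A (Python) =====
-- import math
--
-- def u_bare(n):
--     M = (2**31) - 1
--     val = 42
--     for _ in range(n):
--         val = (16807 * val + 17 ) % M
--     return val
--
-- def u(n):
--     return u_bare(n%999983)
--
-- def T_aux(m,n,i):
--     arbre = []
--     if m == 1 :
--         return arbre
--     elif m == 2 or u(n)%3 == 0 :
--         arbre.append([m-1,n+1,i+1])
--         arbre.extend(T_aux(m-1,n+1,i+1))
--         return arbre
--     arbre.append([math.floor((m-1)/2),n+1,i+1])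
--     arbre.extend(T_aux(math.floor((m-1)/2),n+1,i+1))
--     arbre.append([math.ceil((m-1)/2),math.floor(n+1+(m-1)/2),math.floor(i+1+(m-1)/2)])
--     arbre.extend(T_aux(math.ceil((m-1)/2),math.floor(n+1+(m-1)/2),math.floor(i+1+(m-1)/2)))
--     return arbre
-- ===== SOURCE B (Python) =====
-- import math
--
-- _M = (2**31) - 1
--
-- def _pow_geom(k):
--     # returns (16807**k % _M, (1 + 16807 + ... + 16807**(k-1)) % _M) in O(log k)
--     if k == 0:
--         return (1, 0)
--     p, s = _pow_geom(k // 2)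
--     p2 = (p * p) % _M
--     s2 = (s * (1 + p)) % _M
--     if k % 2 == 1:
--         return ((p2 * 16807) % _M, (s2 * 16807 + 1) % _M)
--     return (p2, s2)
--
-- def _u(n):
--     # closed form of the LCG iterate: val_k = 42*16807^k + 17*(16807^(k-1)+...+1) mod _M
--     k = n % 999983
--     p, s = _pow_geom(k)
--     return (42 * p + 17 * s) % _M
--
-- def _children(m, n, i):
--     if m == 1:
--         return []
--     if m == 2 or _u(n) % 3 == 0:
--         return [(m - 1, n + 1, i + 1)]
--     h = (m - 1) // 2
--     return [(h, n + 1, i + 1), (m - 1 - h, n + 1 + h, i + 1 + h)]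
--
-- def T_aux(m, n, i):
--     # explicit-stack preorder traversal; the root itself is not emitted
--     out = []
--     stack = [(m, n, i, False)]
--     while stack:
--         m0, n0, i0, emit = stack.pop()
--         if emit:
--             out.append([m0, n0, i0])
--         for c in reversed(_children(m0, n0, i0)):
--             stack.append((c[0], c[1], c[2], True))
--     return out
-- ===== Notes on version B (the rewrite author's own statement) =====
-- stated objective: faster
-- what changed: u is computed in O(log k) by fast-doubling of the affine LCG map (modular power + geometric sum) instead of iterating up to 999982 times, and the tree is built by an explicit-stack preorder loop instead of recursion with list copies.
import Mathlib
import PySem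

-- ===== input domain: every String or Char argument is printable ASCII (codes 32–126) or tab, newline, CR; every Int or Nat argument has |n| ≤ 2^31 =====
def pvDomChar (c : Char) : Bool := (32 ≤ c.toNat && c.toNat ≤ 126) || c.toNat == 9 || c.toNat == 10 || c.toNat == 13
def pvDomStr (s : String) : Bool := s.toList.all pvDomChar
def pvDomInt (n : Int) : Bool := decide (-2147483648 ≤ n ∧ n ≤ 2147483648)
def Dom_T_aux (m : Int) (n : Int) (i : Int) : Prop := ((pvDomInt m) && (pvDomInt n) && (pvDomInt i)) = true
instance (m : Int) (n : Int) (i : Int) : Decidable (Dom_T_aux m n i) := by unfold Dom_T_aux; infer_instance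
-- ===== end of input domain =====

-- B replaces the per-node O(k) LCG iteration of u (k = n % 999983, up to ~10^6) by an
-- O(log k) fast-doubling computation of the affine map's power, and builds the tree with
-- an explicit stack instead of recursion.

-- ===== PORT A =====
-- u_bare: 'for _ in range(n)' — for n ≤ 0 the range is empty, which n.toNat matches.
def u_bare (n : Int) : Int :=
  (List.range n.toNat).foldl (fun val _ => PySem.Int.mod (16807 * val + 17) (2 ^ 31 - 1)) 42

def u (n : Int) : Int := u_bare (PySem.Int.mod n 999983)

-- math.ceil(x/2): exact for the integers admitted by Dom (|x| ≤ 2^31 is exact in a double)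
def pvCeilHalf (x : Int) : Int := -(PySem.Int.floordiv (-x) 2)

-- Python's 'if m == 1: return []' is the 'm ≤ 1' guard: for m < 1 the Python recursion
-- never returns, so no value is claimed there (both ports return [] and agree).
-- math.floor((m-1)/2) = PySem.Int.floordiv (m-1) 2 and
-- math.floor(n+1+(m-1)/2) = n+1+PySem.Int.floordiv (m-1) 2 exactly on Dom (floats are exact there).
def T_aux (m : Int) (n : Int) (i : Int) : List (List Int) :=
  if m ≤ 1 then []
  else if m = 2 ∨ PySem.Int.mod (u n) 3 = 0 then
    [m - 1, n + 1, i + 1] :: T_aux (m - 1) (n + 1) (i + 1)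
  else
    ([PySem.Int.floordiv (m - 1) 2, n + 1, i + 1]
        :: T_aux (PySem.Int.floordiv (m - 1) 2) (n + 1) (i + 1))
    ++ ([pvCeilHalf (m - 1), n + 1 + PySem.Int.floordiv (m - 1) 2,
          i + 1 + PySem.Int.floordiv (m - 1) 2]
        :: T_aux (pvCeilHalf (m - 1)) (n + 1 + PySem.Int.floordiv (m - 1) 2)
            (i + 1 + PySem.Int.floordiv (m - 1) 2))
termination_by m.toNat
decreasing_by
  · omega
  · have h := PySem.Int.floordiv_eq_ediv_of_pos (a := m - 1) (b := 2) (by omega)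
    omega
  · have h := PySem.Int.floordiv_eq_ediv_of_pos (a := -(m - 1)) (b := 2) (by omega)
    simp only [pvCeilHalf]
    omega

-- ===== PORT B =====
def pvMB : Int := 2 ^ 31 - 1   -- _M

-- _pow_geom k = (16807^k mod M, (1 + 16807 + … + 16807^(k-1)) mod M) by fast doubling
def pvPowGeom (k : Nat) : Int × Int :=
  if k = 0 then (1, 0)
  else
    let ps := pvPowGeom (k / 2)
    let p2 := PySem.Int.mod (ps.1 * ps.1) pvMB
    let s2 := PySem.Int.mod (ps.2 * (1 + ps.1)) pvMB
    if k % 2 = 1 then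
      (PySem.Int.mod (p2 * 16807) pvMB, PySem.Int.mod (s2 * 16807 + 1) pvMB)
    else (p2, s2)
termination_by k
decreasing_by omega

-- _u  (k = n % 999983 is nonnegative, so .toNat is exact)
def u_alt (n : Int) : Int :=
  let ps := pvPowGeom (PySem.Int.mod n 999983).toNat
  PySem.Int.mod (42 * ps.1 + 17 * ps.2) pvMB

-- _children; the 'm ≤ 1' guard covers Python's 'm == 1' (for m < 1 the Python loop never ends)
def childrenB (m : Int) (n : Int) (i : Int) : List (Int × Int × Int) :=
  if m ≤ 1 then []
  else if m = 2 ∨ PySem.Int.mod (u_alt n) 3 = 0 then [(m - 1, n + 1, i + 1)]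
  else
    [(PySem.Int.floordiv (m - 1) 2, n + 1, i + 1),
     (m - 1 - PySem.Int.floordiv (m - 1) 2, n + 1 + PySem.Int.floordiv (m - 1) 2,
       i + 1 + PySem.Int.floordiv (m - 1) 2)]

-- termination measure helper for the stack loop (cited by decreasing_by)
theorem childrenB_measure (m : Int) (n : Int) (i : Int) :
    ((childrenB m n i).map (fun c => 2 * c.1.toNat + 1)).sum ≤ 2 * m.toNat := by
  unfold childrenB
  split_ifs with h1 h2
  · simp
  · simp; omega
  · have h := PySem.Int.floordiv_eq_ediv_of_pos (a := m - 1) (b := 2) (by omega)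
    simp; omega

-- the while loop; Lean list head = top of the Python stack, so
-- 'for c in reversed(children): stack.append(…)' prepends the children in order
def stackLoop (stack : List (Int × Int × Int × Bool)) (out : List (List Int)) :
    List (List Int) :=
  match stack with
  | [] => out
  | (m0, n0, i0, emit) :: rest =>
      stackLoop (((childrenB m0 n0 i0).map (fun c => (c.1, c.2.1, c.2.2, true))) ++ rest)
        (if emit then out ++ [[m0, n0, i0]] else out)
termination_by (stack.map (fun e => 2 * e.1.toNat + 1)).sum
decreasing_by
  have h := childrenB_measure m0 n0 i0
  simp only [List.map_append, List.sum_append, List.map_map, List.map_cons,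
    List.sum_cons, Function.comp_def]
  omega

def T_aux_alt (m : Int) (n : Int) (i : Int) : List (List Int) :=
  stackLoop [(m, n, i, false)] []

-- ===== PRECONDITION & SPEC =====
def Spec_T_aux (m : Int) (n : Int) (i : Int) (out : List (List Int)) : Prop :=
  out = T_aux_alt m n i
instance (m : Int) (n : Int) (i : Int) (out : List (List Int)) :
    Decidable (Spec_T_aux m n i out) := by unfold Spec_T_aux; infer_instance

-- ===== CLAIM (what is proved, stated in full; the proofs are below) =====
def Claim_equal_T_aux : Prop :=
  ∀ (m : Int) (n : Int) (i : Int), Dom_T_aux m n i → Spec_T_aux m n i (T_aux m n i)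

-- ===== LEMMAS AND PROOFS =====

theorem pvmod_eq (a : Int) : PySem.Int.mod a pvMB = a % pvMB :=
  PySem.Int.mod_eq_emod_of_pos (by norm_num [pvMB])

theorem pv_modeq (a : Int) : a % pvMB ≡ a [ZMOD pvMB] :=
  Int.emod_emod_of_dvd a dvd_rfl

-- the geometric sum 1 + 16807 + … + 16807^(k-1)
def pvS : Nat → Int
  | 0 => 0
  | k + 1 => 16807 * pvS k + 1

theorem pvS_succ' (k : Nat) : pvS (k + 1) = pvS k + 16807 ^ k := by
  induction k with
  | zero => simp [pvS]
  | succ j ih =>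
      calc pvS (j + 2) = 16807 * pvS (j + 1) + 1 := rfl
        _ = 16807 * (pvS j + 16807 ^ j) + 1 := by rw [ih]
        _ = (16807 * pvS j + 1) + 16807 ^ (j + 1) := by ring
        _ = pvS (j + 1) + 16807 ^ (j + 1) := rfl

theorem pvS_double (j : Nat) : pvS (2 * j) = pvS j * (1 + 16807 ^ j) := by
  induction j with
  | zero => simp [pvS]
  | succ j ih =>
      have h : 16807 * pvS j + 1 = pvS j + 16807 ^ j := pvS_succ' j
      have e : 2 * (j + 1) = (2 * j + 1) + 1 := by ring
      rw [e]
      show 16807 * (16807 * pvS (2 * j) + 1) + 1 = pvS (j + 1) * (1 + 16807 ^ (j + 1))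
      rw [ih]
      show 16807 * (16807 * (pvS j * (1 + 16807 ^ j)) + 1) + 1
          = (16807 * pvS j + 1) * (1 + 16807 ^ (j + 1))
      linear_combination 16807 * h

theorem u_bare_closed (k : Nat) :
    (List.range k).foldl (fun val _ => PySem.Int.mod (16807 * val + 17) (2 ^ 31 - 1)) 42
      = (42 * 16807 ^ k + 17 * pvS k) % pvMB := by
  induction k with
  | zero => simp [pvS]; norm_num [pvMB]
  | succ k ih =>
      rw [List.range_succ, List.foldl_append, ih]
      simp only [List.foldl_cons, List.foldl_nil]
      have hM : (2 ^ 31 - 1 : Int) = pvMB := by norm_num [pvMB]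
      rw [hM, pvmod_eq]
      have h2 : (16807 * ((42 * 16807 ^ k + 17 * pvS k) % pvMB) + 17) % pvMB
          = (16807 * (42 * 16807 ^ k + 17 * pvS k) + 17) % pvMB :=
        ((pv_modeq _).mul_left 16807).add_right 17
      rw [h2]
      congr 1
      show 16807 * (42 * 16807 ^ k + 17 * pvS k) + 17
          = 42 * 16807 ^ (k + 1) + 17 * (16807 * pvS k + 1)
      ring

theorem pvPowGeom_spec (k : Nat) :
    pvPowGeom k = (16807 ^ k % pvMB, pvS k % pvMB) := by
  induction k using Nat.strong_induction_on with
  | _ k ih =>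
    rw [pvPowGeom]
    by_cases h0 : k = 0
    · subst h0; simp [pvS]; norm_num [pvMB]
    · simp only [h0, if_false]
      rw [ih (k / 2) (by omega)]
      simp only [pvmod_eq]
      have hp2 : (16807 ^ (k / 2) % pvMB) * (16807 ^ (k / 2) % pvMB) % pvMB
          = 16807 ^ (2 * (k / 2)) % pvMB := by
        have := (pv_modeq (16807 ^ (k / 2))).mul (pv_modeq (16807 ^ (k / 2)))
        rw [(this : _ % pvMB = _)]; congr 1; rw [two_mul, pow_add]
      have hs2 : (pvS (k / 2) % pvMB) * (1 + 16807 ^ (k / 2) % pvMB) % pvMB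
          = pvS (2 * (k / 2)) % pvMB := by
        have := (pv_modeq (pvS (k / 2))).mul ((pv_modeq (16807 ^ (k / 2))).add_left 1)
        rw [(this : _ % pvMB = _), pvS_double]
      by_cases hb : k % 2 = 1
      · simp only [hb, if_true]
        have hk : k = 2 * (k / 2) + 1 := by omega
        have e1 : 16807 ^ (k / 2) % pvMB * (16807 ^ (k / 2) % pvMB) % pvMB * 16807 % pvMB
            = 16807 ^ k % pvMB := by
          rw [hp2, ((pv_modeq (16807 ^ (2 * (k / 2)))).mul_right 16807 : _ % pvMB = _)]
          congr 1
          conv_rhs => rw [hk, pow_succ]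
        have e2 : (pvS (k / 2) % pvMB * (1 + 16807 ^ (k / 2) % pvMB) % pvMB * 16807 + 1) % pvMB
            = pvS k % pvMB := by
          rw [hs2, (((pv_modeq (pvS (2 * (k / 2)))).mul_right 16807).add_right 1 : _ % pvMB = _)]
          congr 1
          conv_rhs => rw [hk]
          show pvS (2 * (k / 2)) * 16807 + 1 = 16807 * pvS (2 * (k / 2)) + 1
          ring
        simp only [Prod.mk.injEq]
        exact ⟨e1, e2⟩
      · simp only [hb, if_false]
        have hk : k = 2 * (k / 2) := by omega
        rw [hp2, hs2, ← hk]

theorem u_eq (n : Int) : u n = u_alt n := by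
  unfold u u_alt u_bare
  rw [pvPowGeom_spec, u_bare_closed, pvmod_eq]
  exact (((pv_modeq _).mul_left 42).add ((pv_modeq _).mul_left 17)).symm

theorem pvCeilHalf_eq (x : Int) : pvCeilHalf x = x - PySem.Int.floordiv x 2 := by
  unfold pvCeilHalf
  rw [PySem.Int.floordiv_eq_ediv_of_pos (by norm_num),
    PySem.Int.floordiv_eq_ediv_of_pos (by norm_num)]
  omega

theorem T_aux_eq_flatMap (m n i : Int) :
    T_aux m n i
      = (childrenB m n i).flatMap
          (fun c => [c.1, c.2.1, c.2.2] :: T_aux c.1 c.2.1 c.2.2) := by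
  conv_lhs => rw [T_aux]
  rw [u_eq]
  unfold childrenB
  split_ifs with h1 h2
  · simp
  · simp
  · rw [pvCeilHalf_eq]
    simp

theorem stackLoop_spec (stack : List (Int × Int × Int × Bool)) (out : List (List Int)) :
    stackLoop stack out
      = out ++ stack.flatMap
          (fun e => (if e.2.2.2 then [[e.1, e.2.1, e.2.2.1]] else [])
            ++ T_aux e.1 e.2.1 e.2.2.1) := by
  induction stack, out using stackLoop.induct with
  | case1 out => simp [stackLoop]
  | case2 out m0 n0 i0 emit rest ih =>
      simp only [dite_eq_ite] at ih
      rw [stackLoop, ih, List.flatMap_append, List.flatMap_map]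
      rw [show (List.flatMap
            (fun a => (if true = true then [[a.1, a.2.1, a.2.2]] else [])
              ++ T_aux a.1 a.2.1 a.2.2) (childrenB m0 n0 i0))
          = T_aux m0 n0 i0 from by
        rw [T_aux_eq_flatMap m0 n0 i0]; simp]
      cases emit <;> simp

-- ===== VERDICT (by name: the statement is the Claim_ definition above) =====
theorem T_aux_spec : Claim_equal_T_aux := by
  intro m n i _
  unfold Spec_T_aux T_aux_alt
  rw [stackLoop_spec]
  simp
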